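-- pv_equiv track=rewrite | github.com/RegNLP/ObliQACrossRef | src/02_generate_qas.py | span_hints
-- ===== SOURCE A (Python) =====
-- def span_hints(answer_spans: list) -> dict:
--     """Return soft constraints we’ll bake into the prompt + post-check."""
--     want_time = any(s.get("type") in {"DATE","DURATION"} for s in answer_spans or [])
--     want_num  = any(s.get("type") in {"MONEY","PERCENT"} for s in answer_spans or [])
--     want_term = any(s.get("type") == "TERM" for s in answer_spans or [])
--     want_sect = any(s.get("type") == "SECTION" for s in answer_spans or [])
--     return {
--         "want_time": want_time, "want_num": want_num,
--         "want_term": want_term, "want_sect": want_sect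
--     }
-- ===== SOURCE B (Python) =====
-- def span_hints(answer_spans: list) -> dict:
--     """Return soft constraints we’ll bake into the prompt + post-check."""
--     types = {s.get("type") for s in answer_spans or []}
--     return {
--         "want_time": "DATE" in types or "DURATION" in types,
--         "want_num": "MONEY" in types or "PERCENT" in types,
--         "want_term": "TERM" in types,
--         "want_sect": "SECTION" in types,
--     }
-- ===== Notes on version B (the rewrite author's own statement) =====
-- stated objective: simpler
-- what changed: B builds the set of span types in one pass and answers each flag by a set-membership test, replacing A's four independent any() scans over the whole list.
import Mathlib
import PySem

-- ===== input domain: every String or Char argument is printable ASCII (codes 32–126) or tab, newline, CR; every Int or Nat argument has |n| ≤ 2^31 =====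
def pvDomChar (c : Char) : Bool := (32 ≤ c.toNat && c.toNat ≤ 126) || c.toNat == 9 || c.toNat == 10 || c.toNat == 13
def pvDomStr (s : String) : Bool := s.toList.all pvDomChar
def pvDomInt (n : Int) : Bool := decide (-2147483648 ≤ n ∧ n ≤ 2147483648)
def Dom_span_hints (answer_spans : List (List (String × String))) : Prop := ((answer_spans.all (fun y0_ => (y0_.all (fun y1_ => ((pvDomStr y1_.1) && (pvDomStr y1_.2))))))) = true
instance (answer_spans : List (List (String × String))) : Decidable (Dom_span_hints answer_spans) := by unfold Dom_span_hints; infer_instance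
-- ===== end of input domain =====

-- ===== PORT A =====
def span_hints (answer_spans : List (List (String × String))) : List (String × Bool) :=
  -- each 'any(... for s in answer_spans or [])' is its own scan, in A's order
  let want_time := answer_spans.any (fun s =>
    (PySem.Dict.mk s).get? "type" == some "DATE" || (PySem.Dict.mk s).get? "type" == some "DURATION")
  let want_num := answer_spans.any (fun s =>
    (PySem.Dict.mk s).get? "type" == some "MONEY" || (PySem.Dict.mk s).get? "type" == some "PERCENT")
  let want_term := answer_spans.any (fun s => (PySem.Dict.mk s).get? "type" == some "TERM")
  let want_sect := answer_spans.any (fun s => (PySem.Dict.mk s).get? "type" == some "SECTION")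
  [("want_time", want_time), ("want_num", want_num),
   ("want_term", want_term), ("want_sect", want_sect)]

-- ===== PORT B =====
def span_hints_alt (answer_spans : List (List (String × String))) : List (String × Bool) :=
  -- one pass: the set comprehension {s.get("type") for s in answer_spans or []}
  let types : PySem.Set (Option String) :=
    PySem.Set.ofList (answer_spans.map (fun s => (PySem.Dict.mk s).get? "type"))
  [("want_time", types.contains (some "DATE") || types.contains (some "DURATION")),
   ("want_num", types.contains (some "MONEY") || types.contains (some "PERCENT")),
   ("want_term", types.contains (some "TERM")),
   ("want_sect", types.contains (some "SECTION"))]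

-- ===== PRECONDITION & SPEC =====
def Spec_span_hints (answer_spans : List (List (String × String))) (out : List (String × Bool)) : Prop := out = span_hints_alt answer_spans
instance (answer_spans : List (List (String × String))) (out : List (String × Bool)) : Decidable (Spec_span_hints answer_spans out) := by unfold Spec_span_hints; infer_instance

-- ===== CLAIM (what is proved, stated in full; the proofs are below) =====
def Claim_equal_span_hints : Prop := ∀ (answer_spans : List (List (String × String))), Dom_span_hints answer_spans → Spec_span_hints answer_spans (span_hints answer_spans)

-- ===== LEMMAS AND PROOFS =====

-- ===== VERDICT (by name: the statement is the Claim_ definition above) =====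
-- A tests both alternatives inside one scan; B scans once per alternative: any distributes over ||
lemma any_or_split {α : Type} (l : List α) (p q : α → Bool) :
    (l.any fun x => p x || q x) = (l.any p || l.any q) := by
  induction l with
  | nil => rfl
  | cons a t ih => simp [List.any_cons, ih, Bool.or_assoc, Bool.or_left_comm]

-- the set built by B contains 'some t' iff some span's "type" lookup yields t — each of A's scans is such a test
lemma contains_types_iff (answer_spans : List (List (String × String))) (t : String) :
    (PySem.Set.ofList (answer_spans.map (fun s => (PySem.Dict.mk s).get? "type"))).contains (some t)
      = answer_spans.any (fun s => (PySem.Dict.mk s).get? "type" == some t) := by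
  rw [Bool.eq_iff_iff, PySem.Set.contains_iff, PySem.Set.mem_ofList, List.any_eq_true]
  simp only [List.mem_map, beq_iff_eq]

theorem span_hints_spec : Claim_equal_span_hints := by
  intro answer_spans _
  unfold Spec_span_hints span_hints span_hints_alt
  simp only [contains_types_iff, any_or_split]
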